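-- pv_equiv track=rewrite | github.com/stainlessjack/creationmyth | test.py | solution
-- ===== SOURCE A (Python) =====
-- def solution(arr):
--     max_length = 0
--     for word in arr:
--         max_length = len(word) if len(word) > max_length else max_length
--
--     final_string = ""
--     for i in range(0, max_length):
--         for word in arr:
--             if i < len(word):
--                 final_string = final_string + word[i]
--
--     return final_string
-- ===== SOURCE B (Python) =====
-- def solution(arr):
--     # Word-major scatter: one pass over each word, dropping its chars into per-column buckets.
--     cols = []
--     for word in arr:
--         for i, ch in enumerate(word):
--             if i < len(cols):
--                 cols[i].append(ch)
--             else: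
--                 cols.append([ch])
--     return "".join("".join(col) for col in cols)
-- ===== Notes on version B (the rewrite author's own statement) =====
-- stated objective: alternative
-- what changed: Replaces A's column-major sweep (rescanning every word for each column index under a precomputed max length) by a single word-major pass that scatters each word's characters into per-column list buckets and joins once; no max-length pass at all.
import Mathlib
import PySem

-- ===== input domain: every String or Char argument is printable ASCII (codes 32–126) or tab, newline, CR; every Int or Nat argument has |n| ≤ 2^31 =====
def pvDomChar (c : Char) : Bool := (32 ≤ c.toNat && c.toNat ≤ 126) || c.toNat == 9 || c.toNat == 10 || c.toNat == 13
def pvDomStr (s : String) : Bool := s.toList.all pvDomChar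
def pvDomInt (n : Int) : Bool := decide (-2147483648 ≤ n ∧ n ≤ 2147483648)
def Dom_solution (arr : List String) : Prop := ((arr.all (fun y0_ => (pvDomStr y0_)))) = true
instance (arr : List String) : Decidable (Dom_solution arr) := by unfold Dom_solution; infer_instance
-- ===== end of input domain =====

-- B changes the traversal: one pass per word scattering its chars into per-column buckets
-- (word-major, no max-length pass), instead of A's column-major rescan of every word per column index.

-- ===== PORT A =====
-- column-major: for i in range(0, max_length): for word in arr: if i < len(word): final_string += word[i]
def solution (arr : List String) : String :=
  let maxLength : Int := arr.foldl (fun m w => if PySem.Str.len w > m then PySem.Str.len w else m) 0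
  let finalString : List Char :=
    (PySem.List.pyRange 0 maxLength 1).foldl (fun s i =>
      arr.foldl (fun s w =>
        if i < PySem.Str.len w then s ++ (PySem.List.pyGet? w.toList i).toList else s) s) []
  String.ofList finalString

-- ===== PORT B =====
-- inner loop of Source B: for i, ch in enumerate(word): cols[i].append(ch) if i < len(cols) else cols.append([ch])
def solutionAltStep (cols : List (List Char)) (w : String) : List (List Char) :=
  (PySem.List.enumerate w.toList 0).foldl (fun cols p =>
    if p.1 < (cols.length : Int) then
      cols.set p.1.toNat (cols.getD p.1.toNat [] ++ [p.2])
    else cols ++ [[p.2]]) cols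

def solution_alt (arr : List String) : String :=
  let cols := arr.foldl solutionAltStep []
  PySem.Str.join "" (cols.map (fun col => String.ofList col))

-- ===== PRECONDITION & SPEC =====
def Spec_solution (arr : List String) (out : String) : Prop := out = solution_alt arr
instance (arr : List String) (out : String) : Decidable (Spec_solution arr out) := by unfold Spec_solution; infer_instance

-- ===== CLAIM (what is proved, stated in full; the proofs are below) =====
def Claim_equal_solution : Prop := ∀ (arr : List String), Dom_solution arr → Spec_solution arr (solution arr)

-- ===== LEMMAS AND PROOFS =====

-- merge one word's chars into the column buckets, structurally
def mergeCols : List (List Char) → List Char → List (List Char)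
  | cols, [] => cols
  | [], c :: cs => [c] :: mergeCols [] cs
  | col :: cols, c :: cs => (col ++ [c]) :: mergeCols cols cs

def maxLenN (ws : List String) : Nat := ws.foldl (fun m w => max m w.toList.length) 0

def colChars (ws : List String) (k : Nat) : List Char := ws.flatMap (fun w => (w.toList[k]?).toList)

theorem joinNil (parts : List (List Char)) : PySem.Chars.join [] parts = parts.flatten := by
  induction parts with
  | nil => simp [PySem.Chars.join_nil]
  | cons a t ih =>
    cases t with
    | nil => simp [PySem.Chars.join_singleton]
    | cons b t2 => rw [PySem.Chars.join_cons_cons]; simp [ih]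

-- B's enumerate-fold over one word is mergeCols
theorem foldE (cs : List Char) : ∀ (pre post : List (List Char)),
    (PySem.List.enumerate cs (pre.length : Int)).foldl (fun cols p =>
        if p.1 < (cols.length : Int) then
          cols.set p.1.toNat (cols.getD p.1.toNat [] ++ [p.2])
        else cols ++ [[p.2]]) (pre ++ post)
      = pre ++ mergeCols post cs := by
  induction cs with
  | nil => intro pre post; simp [PySem.List.enumerate_nil, mergeCols]
  | cons c cs ih =>
    intro pre post
    rw [PySem.List.enumerate_cons]
    cases post with
    | nil =>
      have hc : ¬ ((pre.length : Int) < ((pre ++ ([] : List (List Char))).length : Int)) := by simp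
      rw [List.foldl_cons]
      simp only [hc, if_false]
      have h2 : pre ++ ([] : List (List Char)) ++ [[c]] = (pre ++ [[c]]) ++ [] := by simp
      have h3 : (pre.length : Int) + 1 = ((pre ++ [[c]]).length : Int) := by simp
      rw [h2, h3, ih (pre ++ [[c]]) []]
      simp [mergeCols]
    | cons col rest =>
      have hc : ((pre.length : Int) < ((pre ++ col :: rest).length : Int)) := by
        simp
      rw [List.foldl_cons]
      simp only [hc, if_pos]
      have htn : ((pre.length : Int)).toNat = pre.length := by simp
      have hget : (pre ++ col :: rest).getD pre.length [] = col := by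
        simp [List.getD]
      have hset : (pre ++ col :: rest).set pre.length (col ++ [c]) = (pre ++ [col ++ [c]]) ++ rest := by
        rw [List.set_append]
        simp
      rw [htn, hget, hset]
      have h3 : (pre.length : Int) + 1 = ((pre ++ [col ++ [c]]).length : Int) := by simp
      rw [h3, ih (pre ++ [col ++ [c]]) rest]
      simp [mergeCols]

theorem step_eq_merge (cols : List (List Char)) (w : String) :
    solutionAltStep cols w = mergeCols cols w.toList := by
  have := foldE w.toList [] cols
  simpa [solutionAltStep] using this

-- mergeCols on a range-indexed column table
theorem mergeRange (cs : List Char) : ∀ (M : Nat) (f : Nat → List Char),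
    mergeCols ((List.range M).map f) cs
      = (List.range (max M cs.length)).map
          (fun k => (if k < M then f k else []) ++ (cs[k]?).toList) := by
  induction cs with
  | nil =>
    intro M f
    simp only [List.length_nil, Nat.max_zero]
    have : mergeCols ((List.range M).map f) [] = (List.range M).map f := by
      cases (List.range M).map f <;> simp [mergeCols]
    rw [this]
    apply List.map_congr_left
    intro k hk
    simp [List.mem_range.mp hk]
  | cons c cs ih =>
    intro M f
    cases M with
    | zero =>
      have h1 : mergeCols ((List.range 0).map f) (c :: cs) = [c] :: mergeCols ((List.range 0).map f) cs := by
        simp [mergeCols]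
      rw [h1, ih 0 f]
      simp only [List.length_cons, Nat.zero_max]
      rw [List.range_succ_eq_map]
      simp [List.map_map, Function.comp_def]
    | succ M' =>
      rw [List.range_succ_eq_map, List.map_cons, List.map_map]
      have h1 : mergeCols (f 0 :: (List.range M').map (f ∘ Nat.succ)) (c :: cs)
          = (f 0 ++ [c]) :: mergeCols ((List.range M').map (f ∘ Nat.succ)) cs := by
        simp [mergeCols]
      rw [h1, ih M' (f ∘ Nat.succ)]
      have hmax : max (M' + 1) (c :: cs).length = max M' cs.length + 1 := by
        simp [Nat.succ_max_succ]
      rw [hmax, List.range_succ_eq_map, List.map_cons, List.map_map]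
      simp [Function.comp_def]

theorem colChars_of_maxLen_le (ws : List String) (k : Nat) (h : maxLenN ws ≤ k) :
    colChars ws k = [] := by
  have hall := (PySem.List.le_foldl_max_nat ws (fun w => w.toList.length) 0).2
  simp only [colChars, List.flatMap_eq_nil_iff]
  intro w hw
  have : w.toList.length ≤ maxLenN ws := hall w hw
  have : w.toList[k]? = none := by
    apply List.getElem?_eq_none
    omega
  simp [this]

theorem maxLenN_append (ws : List String) (w : String) :
    maxLenN (ws ++ [w]) = max (maxLenN ws) w.toList.length := by
  simp [maxLenN, List.foldl_append]

-- the column table B builds IS the range-indexed table of per-column characters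
theorem colsA_eq (ws : List String) :
    ws.foldl (fun cols w => mergeCols cols w.toList) []
      = (List.range (maxLenN ws)).map (colChars ws) := by
  induction ws using List.reverseRecOn with
  | nil => simp [maxLenN]
  | append_singleton ws w ih =>
    rw [List.foldl_append, List.foldl_cons, List.foldl_nil, ih, mergeRange, maxLenN_append]
    apply List.map_congr_left
    intro k hk
    by_cases hkM : k < maxLenN ws
    · simp [hkM, colChars, List.flatMap_append]
    · simp only [if_neg hkM]
      rw [colChars, List.flatMap_append]
      rw [← colChars, colChars_of_maxLen_le ws k (by omega)]
      simp

-- A's inner word loop collects column k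
theorem innerA (ws : List String) (k : Nat) (s : List Char) :
    ws.foldl (fun s w =>
        if (k : Int) < PySem.Str.len w then s ++ (PySem.List.pyGet? w.toList (k : Int)).toList else s) s
      = s ++ colChars ws k := by
  have hcong : ws.foldl (fun s w =>
        if (k : Int) < PySem.Str.len w then s ++ (PySem.List.pyGet? w.toList (k : Int)).toList else s) s
      = ws.foldl (fun s w => s ++ (w.toList[k]?).toList) s := by
    apply PySem.List.foldl_congr_mem
    intro acc w _
    by_cases h : k < w.toList.length
    · simp [PySem.Str.len_eq]
    · have : w.toList[k]? = none := List.getElem?_eq_none (by omega)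
      simp [PySem.Str.len_eq, this]
  rw [hcong, PySem.List.foldl_append_eq_flatMap]
  rfl

-- A's running max is maxLenN
theorem maxA (ws : List String) : ∀ (m : Nat),
    ws.foldl (fun m w => if PySem.Str.len w > m then PySem.Str.len w else m) (m : Int)
      = ((ws.foldl (fun m w => max m w.toList.length) m : Nat) : Int) := by
  induction ws with
  | nil => intro m; simp
  | cons w ws ih =>
    intro m
    rw [List.foldl_cons, List.foldl_cons]
    have hstep : (if PySem.Str.len w > (m : Int) then PySem.Str.len w else (m : Int))
        = ((max m w.toList.length : Nat) : Int) := by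
      simp only [PySem.Str.len_eq]
      split_ifs with h
      · push_cast
        omega
      · push_cast
        omega
    rw [hstep, ih]

theorem solutionA_closed (arr : List String) :
    solution arr = String.ofList ((List.range (maxLenN arr)).flatMap (colChars arr)) := by
  unfold solution
  show String.ofList ((PySem.List.pyRange 0 (arr.foldl (fun m w => if PySem.Str.len w > m then PySem.Str.len w else m) 0) 1).foldl (fun s i =>
      arr.foldl (fun s w =>
        if i < PySem.Str.len w then s ++ (PySem.List.pyGet? w.toList i).toList else s) s) [])
    = String.ofList ((List.range (maxLenN arr)).flatMap (colChars arr))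
  have hmax := maxA arr 0
  simp only [Nat.cast_zero] at hmax
  rw [hmax]
  have hM : (((maxLenN arr : Int)) - 0).toNat = maxLenN arr := by simp
  have hfold : List.foldl (fun m w => max m w.toList.length) 0 arr = maxLenN arr := rfl
  rw [PySem.List.pyRange_one, hfold, hM, List.foldl_map]
  have hcong : (List.range (maxLenN arr)).foldl (fun (x : List Char) (y : Nat) =>
        arr.foldl (fun s w =>
          if (0 : Int) + (y : Int) < PySem.Str.len w then
            s ++ (PySem.List.pyGet? w.toList ((0 : Int) + (y : Int))).toList
          else s) x) []
      = (List.range (maxLenN arr)).foldl (fun s k => s ++ colChars arr k) [] := by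
    apply PySem.List.foldl_congr_mem
    intro acc k _
    have h0 : ((0 : Int) + (k : Int)) = (k : Int) := by omega
    rw [h0, innerA]
  rw [hcong, PySem.List.foldl_append_eq_flatMap]
  simp

theorem solutionAlt_closed (arr : List String) :
    solution_alt arr = String.ofList ((List.range (maxLenN arr)).flatMap (colChars arr)) := by
  unfold solution_alt
  have hstep : arr.foldl solutionAltStep [] = arr.foldl (fun cols w => mergeCols cols w.toList) [] := by
    apply PySem.List.foldl_congr_mem
    intro cols w _
    exact step_eq_merge cols w
  rw [hstep, colsA_eq]
  apply String.toList_inj.mp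
  rw [PySem.Str.toList_join]
  simp only [List.map_map, Function.comp_def, String.toList_ofList]
  have : ("" : String).toList = [] := rfl
  rw [this, joinNil]
  simp [List.flatMap_def]

-- ===== VERDICT (by name: the statement is the Claim_ definition above) =====
theorem solution_spec : Claim_equal_solution := by
  intro arr _
  unfold Spec_solution
  rw [solutionA_closed, solutionAlt_closed]
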